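-- pv_equiv track=rewrite | github.com/DavidNiteas/MassLib4Search | masslib4search/snaps/MassSearchTools/utils/spectrum_tools.py | restructure_sequence
-- ===== SOURCE A (Python) =====
-- from itertools import accumulate
-- from typing import List,Tuple,Any
--
-- def restructure_sequence(
--     flattened: List[Any],
--     structure: List[int],
-- ) -> List[List[Any]]:
--     """
--     根据结构记录将单层列表恢复为原始嵌套结构
--
--     本实现使用累积和算法生成精确切片点，时间复杂度为O(n)。包含结构校验机制，
--     当结构记录与压平列表长度不匹配时抛出明确异常。
--
--     参数：
--     flattened -- 压平后的单层列表
--     structure -- 原始结构记录（各子列表长度列表）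
--
--     返回：
--     恢复后的嵌套列表结构
--
--     异常：
--     ValueError -- 当sum(structure) != len(flattened)时抛出
--
--     示例：
--     >>> restructure_sequence([1,2,3,4,5], [3,2])
--     [[1,2,3], [4,5]]
--
--     >>> restructure_sequence([], [0,0])
--     [[], []]
--     """
--
--     if (total := sum(structure)) != len(flattened):
--         raise ValueError(f"结构不匹配，总长度应为{total}，实际是{len(flattened)}")
--
--     slices = list(accumulate(structure, initial=0))
--
--     return [
--         flattened[slices[i]:slices[i+1]]
--         for i in range(len(slices)-1)
--     ]
-- ===== SOURCE B (Python) =====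
-- from itertools import islice
-- from typing import List, Any
--
-- def restructure_sequence(
--     flattened: List[Any],
--     structure: List[int],
-- ) -> List[List[Any]]:
--     if (total := sum(structure)) != len(flattened):
--         raise ValueError(f"结构不匹配，总长度应为{total}，实际是{len(flattened)}")
--     it = iter(flattened)
--     return [list(islice(it, L)) for L in structure]
-- ===== Notes on version B (the rewrite author's own statement) =====
-- stated objective: idiomatic
-- what changed: Replaces the prefix-sum boundary array plus indexed slicing with a single stateful iterator over flattened, consumed segment by segment with islice.
-- outside the precondition, e.g. on restructure_sequence([1], [-1, 2]): A returns [[], [1]], B raises ValueError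
import Mathlib
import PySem

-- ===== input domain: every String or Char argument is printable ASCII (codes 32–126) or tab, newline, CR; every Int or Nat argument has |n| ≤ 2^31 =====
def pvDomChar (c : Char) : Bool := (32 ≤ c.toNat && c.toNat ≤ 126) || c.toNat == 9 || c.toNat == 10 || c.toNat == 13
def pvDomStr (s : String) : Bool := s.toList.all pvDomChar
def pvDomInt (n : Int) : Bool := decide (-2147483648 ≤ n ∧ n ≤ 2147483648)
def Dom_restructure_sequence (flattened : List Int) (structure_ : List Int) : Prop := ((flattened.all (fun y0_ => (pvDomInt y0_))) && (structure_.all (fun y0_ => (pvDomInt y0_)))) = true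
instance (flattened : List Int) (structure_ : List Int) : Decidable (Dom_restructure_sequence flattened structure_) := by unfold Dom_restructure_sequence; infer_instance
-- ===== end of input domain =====

-- B replaces A's prefix-sum boundary array + indexed slicing with a stateful iterator consumed segment by segment (same cost, more idiomatic).


-- ===== PORT A =====
-- itertools.accumulate(structure, initial=0) minus its leading 0 (prepended at the call site)
def pyAccumulate (xs : List Int) (acc : Int) : List Int :=
  match xs with
  | [] => []
  | x :: rest => (acc + x) :: pyAccumulate rest (acc + x)

def restructure_sequence (flattened : List Int) (structure_ : List Int) : List (List Int) :=
  let slices := 0 :: pyAccumulate structure_ 0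
  (List.range (slices.length - 1)).map
    (fun i => PySem.List.slice flattened (some (slices.getD i 0)) (some (slices.getD (i + 1) 0)))

-- ===== PORT B =====
-- the iterator: `it` is the not-yet-consumed suffix of flattened; islice(it, L) takes L items and advances it
def consumeSegs (it : List Int) (structure_ : List Int) : List (List Int) :=
  match structure_ with
  | [] => []
  | L :: rest => it.take L.toNat :: consumeSegs (it.drop L.toNat) rest

def restructure_sequence_alt (flattened : List Int) (structure_ : List Int) : List (List Int) :=
  consumeSegs flattened structure_

-- ===== PRECONDITION & SPEC =====
-- Pre_ excludes (i) inputs where sum(structure) ≠ len(flattened): both A and B raise ValueError there;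
-- (ii) structures containing a negative length: A's value there ([[], [1]] on ([1], [-1, 2])) is an
-- artefact of Python's negative-index slicing, and B itself raises ValueError (islice rejects L < 0).
def Pre_restructure_sequence (flattened : List Int) (structure_ : List Int) : Prop :=
  structure_.sum = (flattened.length : Int) ∧ ∀ x ∈ structure_, 0 ≤ x
instance (flattened : List Int) (structure_ : List Int) : Decidable (Pre_restructure_sequence flattened structure_) := by unfold Pre_restructure_sequence; infer_instance

def pvWitness_restructure_sequence : List Int × List Int := ([1, 2, 3, 4, 5], [3, 2])

def Spec_restructure_sequence (flattened : List Int) (structure_ : List Int) (out : List (List Int)) : Prop := out = restructure_sequence_alt flattened structure_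
instance (flattened : List Int) (structure_ : List Int) (out : List (List Int)) : Decidable (Spec_restructure_sequence flattened structure_ out) := by unfold Spec_restructure_sequence; infer_instance

-- ===== CLAIM (what is proved, stated in full; the proofs are below) =====
def Claim_equal_restructure_sequence : Prop := ∀ (flattened : List Int) (structure_ : List Int), Dom_restructure_sequence flattened structure_ → Pre_restructure_sequence flattened structure_ → Spec_restructure_sequence flattened structure_ (restructure_sequence flattened structure_)

-- ===== LEMMAS AND PROOFS =====

-- A's comprehension over consecutive prefix sums, started at offset `off`, is B's consumption of
-- the suffix `fl.drop off.toNat` (nonnegative lengths only; no sum condition is needed: slicing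
-- past the end clamps exactly as take/drop do).
theorem accum_slices_eq_consume (s : List Int) (fl : List Int) (off : Int)
    (hoff : 0 ≤ off) (hs : ∀ x ∈ s, 0 ≤ x) :
    (List.range ((off :: pyAccumulate s off).length - 1)).map
      (fun i => PySem.List.slice fl (some ((off :: pyAccumulate s off).getD i 0))
                  (some ((off :: pyAccumulate s off).getD (i + 1) 0)))
      = consumeSegs (fl.drop off.toNat) s := by
  induction s generalizing off with
  | nil => simp [pyAccumulate, consumeSegs]
  | cons x rest ih =>
    have hx : 0 ≤ x := hs x (by simp)
    have hrest : ∀ y ∈ rest, 0 ≤ y := fun y hy => hs y (by simp [hy])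
    simp only [pyAccumulate, consumeSegs]
    have hlen : (off :: (off + x) :: pyAccumulate rest (off + x)).length - 1
        = (((off + x) :: pyAccumulate rest (off + x)).length - 1) + 1 := by
      simp
    rw [hlen, List.range_succ_eq_map, List.map_cons, List.map_map]
    congr 1
    · -- head: fl[off : off+x] = (fl.drop off.toNat).take x.toNat
      simp only [List.getD_cons_zero, List.getD_cons_succ]
      rw [PySem.List.slice_toNat fl hoff (show (0:Int) ≤ off + x by omega)]
      congr 1
      omega
    · -- tail
      have := ih (off + x) (by omega) hrest
      rw [show (off + x).toNat = off.toNat + x.toNat from by omega, ← List.drop_drop] at this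
      rw [← this]
      apply List.map_congr_left
      intro i hi
      simp [Function.comp, List.getD]

theorem restructure_sequence_spec' (flattened structure_ : List Int)
    (h : ∀ x ∈ structure_, 0 ≤ x) :
    restructure_sequence flattened structure_ = restructure_sequence_alt flattened structure_ := by
  have := accum_slices_eq_consume structure_ flattened 0 le_rfl h
  simpa [restructure_sequence, restructure_sequence_alt] using this

-- ===== VERDICT (by name: the statement is the Claim_ definition above) =====
theorem restructure_sequence_spec : Claim_equal_restructure_sequence := by
  intro flattened structure_ _ hpre
  exact restructure_sequence_spec' flattened structure_ hpre.2
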